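-- pv_equiv track=rewrite | github.com/ortemx/university | term6/IB/lab6_1.py | decode_ladder
-- ===== SOURCE A (Python) =====
-- def decode_ladder(encoded_msg, columns):
--     # Инициализируем список списков для создания лесенки
--     ladder = [[] for i in range(columns)]
--     # Вычисляем размеры колонок в лесенке
--     column_lengths = []
--     q, r = divmod(len(encoded_msg), columns)
--     for i in range(columns):
--         if i < r:
--             column_lengths.append(q+1)
--         else:
--             column_lengths.append(q)
--     # Записываем закодированное сообщение в лесенку
--     row = 0
--     direction = 1
--     index = 0
--     for length in column_lengths:
--         column_letters = encoded_msg[index:index+length]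
--         index += length
--         ladder[row] = list(column_letters)
--         if row == 0:
--             direction = 1
--         elif row == columns - 1:
--             direction = -1
--         row += direction
--     # Считываем буквы по порядку строк и колонок
--     decoded_msg = ''
--     for i in range(len(encoded_msg)):
--         row, col = divmod(i, columns)
--         decoded_msg += ladder[col][row]
--     return decoded_msg
-- ===== SOURCE B (Python) =====
-- def decode_ladder(encoded_msg, columns):
--     # Closed-form index mapping: output position i reads column c = i % columns
--     # at row i // columns; that character sits in the flat string at offset
--     # c*q + min(c, r) + row (the first r columns have q+1 chars, the rest q).
--     # No ladder or chunk structure is ever built.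
--     q, r = divmod(len(encoded_msg), columns)
--     return ''.join(
--         encoded_msg[(i % columns) * q + min(i % columns, r) + i // columns]
--         for i in range(len(encoded_msg)))
-- ===== Notes on version B (the rewrite author's own statement) =====
-- stated objective: alternative
-- what changed: Replaces the explicit 2-D ladder (zig-zag row/direction state machine, per-character divmod indexing into nested lists, string +=) by a closed-form index mapping: no intermediate structure is built at all; each output character is fetched directly from the flat input at position (i%columns)*q + min(i%columns, r) + i//columns, joined once.
import Mathlib
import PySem

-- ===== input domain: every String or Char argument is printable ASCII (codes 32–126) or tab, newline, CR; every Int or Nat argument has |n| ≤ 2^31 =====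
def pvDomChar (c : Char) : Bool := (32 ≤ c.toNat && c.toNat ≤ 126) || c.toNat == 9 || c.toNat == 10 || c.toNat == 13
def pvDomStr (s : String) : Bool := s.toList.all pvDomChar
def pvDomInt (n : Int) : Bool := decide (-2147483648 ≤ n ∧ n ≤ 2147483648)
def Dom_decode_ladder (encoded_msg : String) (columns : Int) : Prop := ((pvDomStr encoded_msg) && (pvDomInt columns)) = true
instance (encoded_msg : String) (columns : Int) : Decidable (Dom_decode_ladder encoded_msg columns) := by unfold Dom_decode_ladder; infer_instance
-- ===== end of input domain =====

-- B replaces A's explicit 2-D ladder (zig-zag row/direction state machine + per-character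
-- divmod indexing into nested lists) by a closed-form index mapping that fetches each output
-- character directly from the flat input; objective: alternative. Equal return values on Pre_.

-- ===== PORT A =====
-- the write loop's body: state is (ladder, row, direction, index)
def pvWriteStepA (cs : List Char) (columns : Int)
    (st : List (List Char) × Int × Int × Int) (length : Int) :
    List (List Char) × Int × Int × Int :=
  let ladder := st.1; let row := st.2.1; let direction := st.2.2.1; let index := st.2.2.2
  let column_letters := PySem.List.slice cs (some index) (some (index + length))
  let index := index + length
  -- `ladder[row] = list(column_letters)`: exact for 0 ≤ row < len(ladder), the only case
  -- reached inside Pre_ (on other inputs Python raises IndexError and Pre_ excludes them)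
  let ladder := if 0 ≤ row ∧ row.toNat < ladder.length then ladder.set row.toNat column_letters else ladder
  let direction := if row == 0 then 1 else if row == columns - 1 then -1 else direction
  (ladder, row + direction, direction, index)

-- the read loop's body: `decoded_msg += ladder[col][row]`
def pvReadStepA (ladder : List (List Char)) (columns : Int) (acc : List Char) (i : Int) : List Char :=
  let row := PySem.Int.floordiv i columns
  let col := PySem.Int.mod i columns
  -- `ladder[col][row]`: the getD defaults are unreachable inside Pre_ (Python raises IndexError)
  acc ++ [(PySem.List.pyGet? ((PySem.List.pyGet? ladder col).getD []) row).getD ' ']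

def decode_ladder (encoded_msg : String) (columns : Int) : String :=
  let cs := encoded_msg.toList
  match PySem.Int.divmod? (cs.length : Int) columns with
  | none => ""   -- Python raises ZeroDivisionError here (columns == 0); excluded by Pre_
  | some (q, r) =>
    let ladder : List (List Char) := (PySem.List.pyRange 0 columns 1).map (fun _ => ([] : List Char))
    let column_lengths : List Int :=
      (PySem.List.pyRange 0 columns 1).map (fun i => if i < r then q + 1 else q)
    let st := column_lengths.foldl (pvWriteStepA cs columns) (ladder, 0, 1, 0)
    let decoded := (PySem.List.pyRange 0 (cs.length : Int) 1).foldl (pvReadStepA st.1 columns) []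
    String.ofList decoded

-- ===== PORT B =====
def decode_ladder_alt (encoded_msg : String) (columns : Int) : String :=
  let cs := encoded_msg.toList
  match PySem.Int.divmod? (cs.length : Int) columns with
  | none => ""   -- Python raises ZeroDivisionError here (columns == 0); excluded by Pre_
  | some (q, r) =>
    -- ''.join(encoded_msg[(i % columns)*q + min(i % columns, r) + i // columns] for i in range(N))
    -- (the getD default is unreachable inside Pre_: Python would raise IndexError)
    String.ofList ((PySem.List.pyRange 0 (cs.length : Int) 1).map (fun i =>
      (PySem.List.pyGet? cs
        ((PySem.Int.mod i columns) * q + min (PySem.Int.mod i columns) r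
          + PySem.Int.floordiv i columns)).getD ' '))

-- ===== PRECONDITION & SPEC =====
-- Pre_ admits exactly the inputs on which A returns: columns = 0 raises ZeroDivisionError,
-- and columns < 0 with a non-empty message raises IndexError in the read loop.
def Pre_decode_ladder (encoded_msg : String) (columns : Int) : Prop :=
  0 < columns ∨ (encoded_msg = "" ∧ columns ≠ 0)
instance (encoded_msg : String) (columns : Int) : Decidable (Pre_decode_ladder encoded_msg columns) := by
  unfold Pre_decode_ladder; infer_instance

def pvWitness_decode_ladder : String × Int := ("hloel", 2)

def Spec_decode_ladder (encoded_msg : String) (columns : Int) (out : String) : Prop :=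
  out = decode_ladder_alt encoded_msg columns
instance (encoded_msg : String) (columns : Int) (out : String) : Decidable (Spec_decode_ladder encoded_msg columns out) := by
  unfold Spec_decode_ladder; infer_instance

-- ===== CLAIM (what is proved, stated in full; the proofs are below) =====
def Claim_equal_decode_ladder : Prop := ∀ (encoded_msg : String) (columns : Int), Dom_decode_ladder encoded_msg columns → Pre_decode_ladder encoded_msg columns → Spec_decode_ladder encoded_msg columns (decode_ladder encoded_msg columns)

-- ===== LEMMAS AND PROOFS =====

-- chunk c of the message: starts at pvOff, has length pvLen
def pvLen (Q R c : Nat) : Nat := if c < R then Q + 1 else Q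
def pvOff (Q R c : Nat) : Nat := c * Q + min c R
def pvChunk (cs : List Char) (Q R c : Nat) : List Char := (cs.drop (pvOff Q R c)).take (pvLen Q R c)
def pvLadderAt (cs : List Char) (M Q R k : Nat) : List (List Char) :=
  (List.range M).map (fun i => if i < k then pvChunk cs Q R i else [])

lemma pvOff_succ (Q R c : Nat) : pvOff Q R (c + 1) = pvOff Q R c + pvLen Q R c := by
  simp only [pvOff, pvLen, Nat.succ_mul, Nat.min_def]; split_ifs <;> omega

lemma pvOff_le (Q R : Nat) {c d : Nat} (h : c ≤ d) : pvOff Q R c ≤ pvOff Q R d := by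
  simp only [pvOff]
  have := Nat.mul_le_mul_right Q h
  omega

lemma pvOff_top (M Q R : Nat) (hR : R ≤ M) : pvOff Q R M = M * Q + R := by
  simp only [pvOff, Nat.min_eq_right hR]

def pvElem (cs : List Char) (Q R c row : Nat) : Char := ((pvChunk cs Q R c)[row]?).getD ' '

lemma pvLadderAt_set (cs : List Char) (M Q R k : Nat) :
    (pvLadderAt cs M Q R k).set k (pvChunk cs Q R k) = pvLadderAt cs M Q R (k + 1) := by
  apply List.ext_getElem
  · simp [pvLadderAt]
  · intro i h1 h2
    simp only [pvLadderAt, List.length_map, List.length_range] at h2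
    simp only [pvLadderAt, List.getElem_set, List.getElem_map, List.getElem_range]
    split_ifs <;> first | rfl | omega | simp_all

lemma pvLenCast (Q R k : Nat) :
    (if (k : Int) < (R : Int) then (Q : Int) + 1 else (Q : Int)) = ((pvLen Q R k : Nat) : Int) := by
  simp only [pvLen, Nat.cast_lt]; split_ifs <;> push_cast <;> ring

lemma pvWriteA_aux (cs : List Char) (M Q R : Nat) : ∀ (n k : Nat), k + n = M →
    ∀ (row d idx : Int), (n ≠ 0 → (row = (k : Int) ∧ (k = 0 ∨ d = 1) ∧ idx = (pvOff Q R k : Int))) →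
    ((List.map (fun (j : Nat) => if (j : Int) < (R : Int) then (Q : Int) + 1 else (Q : Int)) (List.range' k n)).foldl
        (pvWriteStepA cs (M : Int)) (pvLadderAt cs M Q R k, row, d, idx)).1
      = (List.range M).map (pvChunk cs Q R) := by
  intro n
  induction n with
  | zero =>
    intro k hk row d idx _
    subst hk
    simp only [List.range'_zero, List.map_nil, List.foldl_nil]
    simp only [pvLadderAt]
    apply List.map_congr_left
    intro i hi
    simp only [List.mem_range] at hi
    rw [if_pos (by omega : i < k)]
  | succ n ih =>
    intro k hk row d idx h
    obtain ⟨hrow, hd, hidx⟩ := h (by omega)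
    subst hrow hidx
    have hkM : k < M := by omega
    rw [List.range'_succ, List.map_cons, List.foldl_cons]
    have hstep : pvWriteStepA cs (M : Int) (pvLadderAt cs M Q R k, (k : Int), d, (pvOff Q R k : Int))
        (if (k : Int) < (R : Int) then (Q : Int) + 1 else (Q : Int))
        = (pvLadderAt cs M Q R (k + 1),
           (k : Int) + (if (k : Int) == 0 then 1 else if (k : Int) == (M : Int) - 1 then -1 else d),
           (if (k : Int) == 0 then 1 else if (k : Int) == (M : Int) - 1 then -1 else d),
           (pvOff Q R (k + 1) : Int)) := by
      simp only [pvWriteStepA, pvLenCast]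
      have hcond : (0 : Int) ≤ (k : Int) ∧ ((k : Int)).toNat < (pvLadderAt cs M Q R k).length := by
        constructor
        · exact Int.natCast_nonneg k
        · simpa [pvLadderAt]
      rw [if_pos hcond, PySem.List.slice_natCast_add]
      have hset : (pvLadderAt cs M Q R k).set ((k : Int)).toNat ((cs.drop (pvOff Q R k)).take (pvLen Q R k))
          = pvLadderAt cs M Q R (k + 1) := by
        rw [show ((k : Int)).toNat = k from Int.toNat_natCast k]
        exact pvLadderAt_set cs M Q R k
      rw [hset]
      simp only [Prod.mk.injEq, true_and]
      rw [pvOff_succ]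
      push_cast
      ring
    rw [hstep]
    apply ih (k + 1) (by omega)
    intro hn
    have hklt : k + 1 < M := by omega
    have hne : ((k : Int) == (M : Int) - 1) = false := by
      simp only [beq_eq_false_iff_ne, ne_eq]
      omega
    refine ⟨?_, Or.inr ?_, rfl⟩
    · by_cases hk0 : k = 0
      · subst hk0; simp
      · have h0 : ((k : Int) == 0) = false := by
          simp only [beq_eq_false_iff_ne, ne_eq]
          omega
        rw [h0, hne]
        simp only [Bool.false_eq_true, if_false]
        rcases hd with h | h
        · omega
        · subst h; push_cast; ring
    · by_cases hk0 : k = 0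
      · subst hk0; simp
      · have h0 : ((k : Int) == 0) = false := by
          simp only [beq_eq_false_iff_ne, ne_eq]
          omega
        rw [h0, hne]
        simp only [Bool.false_eq_true, if_false]
        rcases hd with h | h
        · omega
        · exact h

lemma pvReadStepA_eq (cs : List Char) (M Q R : Nat) (hM : 0 < M) (acc : List Char) (i : Nat) :
    pvReadStepA ((List.range M).map (pvChunk cs Q R)) (M : Int) acc (i : Int)
      = acc ++ [pvElem cs Q R (i % M) (i / M)] := by
  have hlt : i % M < M := Nat.mod_lt i hM
  have hrow : PySem.Int.floordiv (i : Int) (M : Int) = ((i / M : Nat) : Int) :=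
    PySem.Int.floordiv_natCast i M
  have hcol : PySem.Int.mod (i : Int) (M : Int) = ((i % M : Nat) : Int) :=
    PySem.Int.mod_natCast i M
  simp only [pvReadStepA, hrow, hcol, PySem.List.pyGet?_natCast]
  simp [pvElem, hlt]

-- each output character read from the ladder equals the flat-index fetch of B
lemma pvElem_flat (cs : List Char) (M Q R i : Nat) (hM : 0 < M) (hRM : R < M)
    (hNQR : M * Q + R = cs.length) (hi : i < cs.length) :
    pvElem cs Q R (i % M) (i / M) = (cs[pvOff Q R (i % M) + i / M]?).getD ' ' := by
  set c := i % M with hc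
  set row := i / M with hrw
  have hcM : c < M := Nat.mod_lt i hM
  have hieq : M * row + c = i := by rw [hc, hrw]; exact Nat.div_add_mod i M
  have hrowlt : row < pvLen Q R c := by
    simp only [pvLen]
    split_ifs with h
    · -- c < R: row ≤ Q since i < M*Q + R ≤ M*(Q+1)
      by_contra hcon
      have h2 : M * Q + M ≤ M * row := by
        have := Nat.mul_le_mul_left M (by omega : Q + 1 ≤ row)
        rwa [Nat.mul_succ] at this
      omega
    · -- c ≥ R: row < Q
      by_contra hcon
      have h2 : M * Q ≤ M * row := Nat.mul_le_mul_left M (by omega)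
      omega
  have hbound : pvOff Q R c + row < cs.length := by
    have h1 : pvOff Q R c + pvLen Q R c = pvOff Q R (c + 1) := (pvOff_succ Q R c).symm
    have h2 : pvOff Q R (c + 1) ≤ pvOff Q R M := pvOff_le Q R hcM
    have h3 := pvOff_top M Q R hRM.le
    omega
  simp only [pvElem, pvChunk]
  rw [List.getElem?_take, if_pos hrowlt, List.getElem?_drop]

lemma pvMain (e : String) (M : Nat) (hM : 0 < M) :
    decode_ladder e (M : Int) = decode_ladder_alt e (M : Int) := by
  have hMne : (M : Int) ≠ 0 := by exact_mod_cast hM.ne'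
  have hRM : e.toList.length % M < M := Nat.mod_lt _ hM
  have hNQR : M * (e.toList.length / M) + e.toList.length % M = e.toList.length :=
    Nat.div_add_mod e.toList.length M
  have hdm : PySem.Int.divmod? ((e.toList.length : Nat) : Int) (M : Int)
      = some (((e.toList.length / M : Nat) : Int), ((e.toList.length % M : Nat) : Int)) := by
    have h1 := PySem.Int.floordiv_natCast e.toList.length M
    have h2 := PySem.Int.mod_natCast e.toList.length M
    simp only [PySem.Int.floordiv, PySem.Int.mod] at h1 h2
    simp only [PySem.Int.divmod?, h1, h2]
    rw [if_neg hMne]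
  simp only [decode_ladder, decode_ladder_alt, hdm]
  set cs := e.toList with hcs
  set N := cs.length with hN
  set Q := N / M with hQ
  set R := N % M with hR0
  -- A's write loop produces exactly the chunk list
  have hlad0 : ((PySem.List.pyRange 0 (M : Int) 1).map (fun _ => ([] : List Char)))
      = pvLadderAt cs M Q R 0 := by
    rw [PySem.List.pyRange_zero_natCast M]
    simp [pvLadderAt, List.map_map, Function.comp_def]
  have hlens : ((PySem.List.pyRange 0 (M : Int) 1).map
        (fun i => if i < (R : Int) then (Q : Int) + 1 else (Q : Int)))
      = List.map (fun (j : Nat) => if (j : Int) < (R : Int) then (Q : Int) + 1 else (Q : Int))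
          (List.range' 0 M) := by
    rw [PySem.List.pyRange_zero_natCast M, List.map_map, ← List.range_eq_range']
    rfl
  have hwrite := pvWriteA_aux cs M Q R M 0 (by omega) 0 1 0
    (fun _ => ⟨by simp, Or.inl rfl, by simp [pvOff]⟩)
  rw [hlens, hlad0, hwrite]
  -- A's read loop is a map over all indices
  have hread : (PySem.List.pyRange 0 (N : Int) 1).foldl
      (pvReadStepA ((List.range M).map (pvChunk cs Q R)) (M : Int)) []
      = (List.range N).map (fun i => pvElem cs Q R (i % M) (i / M)) := by
    rw [PySem.List.pyRange_zero_natCast N, List.foldl_map]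
    rw [show (fun (acc : List Char) (i : Nat) =>
          pvReadStepA ((List.range M).map (pvChunk cs Q R)) (M : Int) acc (i : Int))
        = (fun (acc : List Char) (i : Nat) => acc ++ [pvElem cs Q R (i % M) (i / M)]) from by
      funext acc i
      exact pvReadStepA_eq cs M Q R hM acc i]
    exact PySem.List.foldl_append_singleton_eq_map _ _ _
  rw [hread]
  -- B's map computes the same characters pointwise
  rw [PySem.List.pyRange_zero_natCast N, List.map_map]
  congr 1
  apply List.map_congr_left
  intro i hi
  simp only [List.mem_range] at hi
  have hrow : PySem.Int.floordiv (i : Int) (M : Int) = ((i / M : Nat) : Int) :=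
    PySem.Int.floordiv_natCast i M
  have hcol : PySem.Int.mod (i : Int) (M : Int) = ((i % M : Nat) : Int) :=
    PySem.Int.mod_natCast i M
  have hminc : min ((i % M : Nat) : Int) ((R : Nat) : Int) = ((min (i % M) R : Nat) : Int) := by
    push_cast; rfl
  have hidx : ((i % M : Nat) : Int) * (Q : Int) + min ((i % M : Nat) : Int) ((R : Nat) : Int)
      + ((i / M : Nat) : Int) = ((pvOff Q R (i % M) + i / M : Nat) : Int) := by
    rw [hminc]; simp only [pvOff]; push_cast; ring
  simp only [Function.comp_def, hrow, hcol, hidx, PySem.List.pyGet?_natCast]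
  exact pvElem_flat cs M Q R i hM hRM hNQR hi

theorem decode_ladder_spec : Claim_equal_decode_ladder := by
  intro e c hdom hpre
  unfold Spec_decode_ladder
  by_cases hc : 0 < c
  · have hcM : c = ((c.toNat : Nat) : Int) := (Int.toNat_of_nonneg hc.le).symm
    rw [hcM]
    exact pvMain e c.toNat (by omega)
  · have he : e = "" ∧ c ≠ 0 := by
      rcases hpre with h | h
      · exact absurd h hc
      · exact h
    obtain ⟨he0, hc0⟩ := he
    subst he0
    simp only [decode_ladder, decode_ladder_alt, show ("" : String).toList = [] from rfl,
      List.length_nil, Nat.cast_zero,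
      show PySem.Int.divmod? (0 : Int) c = some (0, 0) from by
        simp only [PySem.Int.divmod?]
        rw [if_neg hc0]
        simp,
      show PySem.List.pyRange 0 0 1 = [] from rfl]
    simp
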